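-- pv_equiv track=rewrite | github.com/fadeyjo/Bauman | 8_term/Тестирование и отладка ПО/ЛР3/main/main.py | calculate
-- ===== SOURCE A (Python) =====
-- def calculate(a, b, c):
--     result = 0
--
--     # Ветвящийся алгоритм
--     if a > b:
--         result = a - b
--         criterion = "a > b"
--     elif a == b:
--         result = a * b
--         criterion = "a = b"
--     else:
--         result = b - a
--         criterion = "a < b"
--
--     # Циклический алгоритм
--     sum_c = 0
--     for i in range(1, c + 1):
--         sum_c += i
--
--     result = result + sum_c
--
--     return result, criterion
-- ===== SOURCE B (Python) =====
-- def calculate(a, b, c):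
--     n = c if c > 0 else 0
--     tri = n * (n + 1) // 2
--     if a == b:
--         return a * b + tri, "a = b"
--     sign = "a > b" if a > b else "a < b"
--     return abs(a - b) + tri, sign
-- ===== Notes on version B (the rewrite author's own statement) =====
-- stated objective: faster
-- what changed: replaces the O(c) summation loop with the unconditional closed-form triangular number max(c,0)*(max(c,0)+1)//2 and collapses the three-way branch into an equality test plus abs(a-b)
import Mathlib
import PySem

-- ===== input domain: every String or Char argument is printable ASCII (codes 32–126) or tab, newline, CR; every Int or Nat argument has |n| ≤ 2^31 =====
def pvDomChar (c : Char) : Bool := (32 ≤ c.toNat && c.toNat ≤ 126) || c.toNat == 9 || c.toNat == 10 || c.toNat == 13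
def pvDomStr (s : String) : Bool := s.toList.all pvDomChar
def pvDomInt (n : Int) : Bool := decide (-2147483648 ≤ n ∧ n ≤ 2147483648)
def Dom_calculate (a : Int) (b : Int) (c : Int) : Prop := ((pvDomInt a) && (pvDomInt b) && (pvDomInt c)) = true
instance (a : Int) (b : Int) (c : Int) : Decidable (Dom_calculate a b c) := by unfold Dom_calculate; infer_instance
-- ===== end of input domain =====

-- ===== PORT A =====
-- B replaces A's O(c) summation loop with the closed-form triangular number of max(c,0)
-- and A's three-way branch with an equality test plus abs(a-b); objective: faster (O(1) vs O(c)).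
def calculate (a : Int) (b : Int) (c : Int) : Int × String :=
  let rc : Int × String :=
    if a > b then (a - b, "a > b")
    else if a = b then (a * b, "a = b")
    else (b - a, "a < b")
  let sum_c : Int := (PySem.List.pyRange 1 (c + 1) 1).foldl (fun acc i => acc + i) 0
  (rc.1 + sum_c, rc.2)

-- ===== PORT B =====
def calculate_alt (a : Int) (b : Int) (c : Int) : Int × String :=
  let n : Int := if c > 0 then c else 0
  let tri : Int := PySem.Int.floordiv (n * (n + 1)) 2
  if a = b then (a * b + tri, "a = b")
  else
    let sign : String := if a > b then "a > b" else "a < b"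
    (|a - b| + tri, sign)

-- ===== PRECONDITION & SPEC =====
def Spec_calculate (a : Int) (b : Int) (c : Int) (out : Int × String) : Prop := out = calculate_alt a b c
instance (a : Int) (b : Int) (c : Int) (out : Int × String) : Decidable (Spec_calculate a b c out) := by unfold Spec_calculate; infer_instance

-- ===== CLAIM =====
def Claim_equal_calculate : Prop := ∀ (a : Int) (b : Int) (c : Int), Dom_calculate a b c → Spec_calculate a b c (calculate a b c)

-- ===== LEMMAS AND PROOFS =====
-- 2 * (sum of pyRange a (a+n) 1 starting from s) = 2*s + n*(2a + n - 1)
theorem pvSumRange (n : Nat) : ∀ (a s : Int),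
    2 * ((PySem.List.pyRange a (a + n) 1).foldl (fun acc i => acc + i) s)
      = 2 * s + n * (2 * a + n - 1) := by
  induction n with
  | zero =>
    intro a s
    rw [show a + ((0:Nat):Int) = a by omega, PySem.List.pyRange_one_eq_nil le_rfl]
    simp
  | succ m ih =>
    intro a s
    rw [show a + ((m+1 : Nat) : Int) = (a + 1) + (m : Int) by push_cast; ring,
        PySem.List.pyRange_one_cons (by omega : a < (a + 1) + (m : Int))]
    simp only [List.foldl_cons]
    rw [ih (a + 1) (s + a)]
    push_cast; ring

-- A's loop equals B's triangular number of max(c,0).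
theorem pvLoopTri (c : Int) :
    (PySem.List.pyRange 1 (c + 1) 1).foldl (fun acc i => acc + i) 0
      = PySem.Int.floordiv ((if c > 0 then c else 0) * ((if c > 0 then c else 0) + 1)) 2 := by
  by_cases hc : c > 0
  · have h := pvSumRange c.toNat 1 0
    rw [show (1 : Int) + (c.toNat : Int) = c + 1 by omega,
        show ((c.toNat : Int)) = c by omega] at h
    have h2 : c * (c + 1) = 2 * ((PySem.List.pyRange 1 (c + 1) 1).foldl (fun acc i => acc + i) 0) := by
      rw [h]; ring
    rw [if_pos hc, PySem.Int.floordiv_eq_ediv_of_pos (by omega), h2]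
    omega
  · rw [if_neg hc, PySem.List.pyRange_one_eq_nil (by omega)]
    simp [PySem.Int.floordiv]

-- ===== VERDICT =====
theorem calculate_spec : Claim_equal_calculate := by
  intro a b c _
  show calculate a b c = calculate_alt a b c
  unfold calculate calculate_alt
  rw [pvLoopTri]
  rcases lt_trichotomy a b with h | h | h
  · simp only [if_neg (show ¬ a > b by omega), if_neg (show ¬ a = b by omega)]
    simp [abs_of_neg (show a - b < 0 by omega)]
  · subst h
    simp
  · simp only [if_pos h, if_neg (show a ≠ b by omega)]
    simp [abs_of_pos (show a - b > 0 by omega)]
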